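-- pv_equiv track=rewrite | github.com/almogboaron/IntroToCsCourseExtended | Hw/hw1_313119265.py | max_div_seq
-- ===== SOURCE A (Python) =====
-- def max_div_seq(n, k):
--     count = 0
--     maxc = 0
--     while(n > 0):
--         if((n%10)%k == 0):
--             count+=1
--             if(count>maxc):
--                 maxc = count
--         else:
--             count=0
--         n = n//10
--
--     return maxc
-- ===== SOURCE B (Python) =====
-- def max_div_seq(n, k):
--     # peel digits (least-significant first)
--     digits = []
--     while n > 0:
--         digits.append(n % 10)
--         n //= 10
--     # positions of digits NOT divisible by k, with sentinels on both ends;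
--     # the longest divisible run is the largest gap between consecutive bad positions
--     bad = [-1] + [i for i, d in enumerate(digits) if d % k != 0] + [len(digits)]
--     return max(b - a - 1 for a, b in zip(bad, bad[1:]))
-- ===== Notes on version B (the rewrite author's own statement) =====
-- stated objective: alternative
-- what changed: Instead of maintaining a running counter and max while dividing n, B peels the digits into a list, records the positions of digits NOT divisible by k between two sentinels, and returns the largest gap between consecutive bad positions minus one.
-- outside the precondition, e.g. on max_div_seq(123, 0): A raises ZeroDivisionError, B raises ZeroDivisionError
import Mathlib
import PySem

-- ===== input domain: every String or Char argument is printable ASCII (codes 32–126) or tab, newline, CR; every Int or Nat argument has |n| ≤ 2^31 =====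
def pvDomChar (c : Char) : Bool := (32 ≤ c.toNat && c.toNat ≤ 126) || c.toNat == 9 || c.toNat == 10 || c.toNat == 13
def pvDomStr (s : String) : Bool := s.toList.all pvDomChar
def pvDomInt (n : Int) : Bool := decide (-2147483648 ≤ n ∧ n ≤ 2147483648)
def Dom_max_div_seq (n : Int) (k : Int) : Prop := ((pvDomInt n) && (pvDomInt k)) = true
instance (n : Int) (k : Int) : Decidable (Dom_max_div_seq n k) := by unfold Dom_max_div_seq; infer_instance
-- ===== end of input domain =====

-- B replaces A's running counter/max with a sentinel-framed list of positions of the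
-- digits NOT divisible by k; the answer is the largest gap between consecutive bad
-- positions, minus one. Same linear cost, different algorithm.

-- ===== PORT A =====
-- the while loop of A, carrying (count, maxc)
def maxDivSeqLoop (n : Int) (k : Int) (count : Int) (maxc : Int) : Int :=
  if _h : 0 < n then
    if PySem.Int.mod (PySem.Int.mod n 10) k = 0 then
      maxDivSeqLoop (PySem.Int.floordiv n 10) k (count + 1)
        (if count + 1 > maxc then count + 1 else maxc)
    else
      maxDivSeqLoop (PySem.Int.floordiv n 10) k 0 maxc
  else maxc
termination_by n.toNat
decreasing_by
  all_goals
    rw [PySem.Int.floordiv_eq_ediv_of_pos (by norm_num : (0:Int) < 10)]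
    omega

def max_div_seq (n : Int) (k : Int) : Int := maxDivSeqLoop n k 0 0

-- ===== PORT B =====
-- the 'while n > 0: digits.append(n % 10); n //= 10' loop of Source B
def pvDigits (n : Int) : List Int :=
  if _h : 0 < n then PySem.Int.mod n 10 :: pvDigits (PySem.Int.floordiv n 10) else []
termination_by n.toNat
decreasing_by
  rw [PySem.Int.floordiv_eq_ediv_of_pos (by norm_num : (0:Int) < 10)]
  omega

-- bad = [-1] + [i for i, d in enumerate(digits) if d % k != 0] + [len(digits)]
-- return max(b - a - 1 for a, b in zip(bad, bad[1:]))   (bad always has ≥ 2 elements)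
def max_div_seq_alt (n : Int) (k : Int) : Int :=
  let digits := pvDigits n
  let bad : List Int :=
    -1 :: (((PySem.List.enumerate digits).filter
              (fun p => PySem.Int.mod p.2 k ≠ 0)).map (fun p => p.1)
           ++ [(digits.length : Int)])
  let gaps := (bad.zip bad.tail).map (fun p => p.2 - p.1 - 1)
  match gaps with
  | [] => 0          -- unreachable: bad always has at least two elements
  | g :: gs => gs.foldl max g

-- ===== PRECONDITION & SPEC =====
-- Pre_ excludes exactly k = 0 with n > 0, where A raises ZeroDivisionError (and B does too).
def Pre_max_div_seq (n : Int) (k : Int) : Prop := n ≤ 0 ∨ k ≠ 0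
instance (n : Int) (k : Int) : Decidable (Pre_max_div_seq n k) := by unfold Pre_max_div_seq; infer_instance
def pvWitness_max_div_seq : Int × Int := (2642, 2)

def Spec_max_div_seq (n : Int) (k : Int) (out : Int) : Prop := out = max_div_seq_alt n k
instance (n : Int) (k : Int) (out : Int) : Decidable (Spec_max_div_seq n k out) := by unfold Spec_max_div_seq; infer_instance

-- ===== CLAIM (what is proved, stated in full; the proofs are below) =====
def Claim_equal_max_div_seq : Prop := ∀ (n : Int) (k : Int), Dom_max_div_seq n k → Pre_max_div_seq n k → Spec_max_div_seq n k (max_div_seq n k)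

-- ===== LEMMAS AND PROOFS =====

-- A's loop, re-expressed structurally on the flag list (flag = digit divisible by k)
def pvListLoop : List Bool → Int → Int → Int
  | [], _, maxc => maxc
  | true :: t, count, maxc =>
      pvListLoop t (count + 1) (if count + 1 > maxc then count + 1 else maxc)
  | false :: t, _, maxc => pvListLoop t 0 maxc

-- the longest run of `true`, given a current prefix run of length c
def pvRun : Int → List Bool → Int
  | c, [] => c
  | c, true :: t => pvRun (c + 1) t
  | c, false :: t => max c (pvRun 0 t)

-- positions of the `false` flags, counting from i
def pvFalseIdx (i : Int) : List Bool → List Int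
  | [] => []
  | true :: t => pvFalseIdx (i + 1) t
  | false :: t => i :: pvFalseIdx (i + 1) t

-- the gap list B computes, expressed structurally: prev = previous bad position, i = next index
def pvGaps (prev i : Int) : List Bool → List Int
  | [] => [i - prev - 1]
  | true :: t => pvGaps prev (i + 1) t
  | false :: t => (i - prev - 1) :: pvGaps i (i + 1) t

theorem pvLoop_eq_listLoop (n k count maxc : Int) :
    maxDivSeqLoop n k count maxc =
      pvListLoop ((pvDigits n).map (fun d => PySem.Int.mod d k == 0)) count maxc := by
  fun_induction maxDivSeqLoop n k count maxc with
  | case1 n count maxc h hm ih =>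
      rw [pvDigits, dif_pos h]
      have hb : (PySem.Int.mod (PySem.Int.mod n 10) k == 0) = true := by simpa using hm
      simp only [List.map_cons, hb]
      exact ih
  | case2 n count maxc h hm ih =>
      rw [pvDigits, dif_pos h]
      have hb : (PySem.Int.mod (PySem.Int.mod n 10) k == 0) = false := by simpa using hm
      simp only [List.map_cons, hb]
      exact ih
  | case3 n count maxc h =>
      rw [pvDigits, dif_neg h]
      rfl

theorem pvRun_nonneg (fl : List Bool) : ∀ c : Int, 0 ≤ c → 0 ≤ pvRun c fl := by
  induction fl with
  | nil => intro c h; simpa [pvRun]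
  | cons b t ih =>
      intro c h
      cases b
      · simp only [pvRun]
        have := ih 0 le_rfl
        omega
      · simp only [pvRun]
        exact ih (c + 1) (by omega)

theorem pvRun_ge (fl : List Bool) : ∀ c : Int, c ≤ pvRun c fl := by
  induction fl with
  | nil => intro c; simp [pvRun]
  | cons b t ih =>
      intro c
      cases b
      · simp only [pvRun]; omega
      · simp only [pvRun]
        have := ih (c + 1)
        omega

theorem pvListLoop_eq_run (fl : List Bool) :
    ∀ count maxc : Int, 0 ≤ count → count ≤ maxc →
      pvListLoop fl count maxc = max maxc (pvRun count fl) := by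
  induction fl with
  | nil => intro c m h1 h2; simp [pvListLoop, pvRun]; omega
  | cons b t ih =>
      intro c m h1 h2
      cases b with
      | true =>
          simp only [pvListLoop, pvRun]
          rw [ih (c + 1) (if c + 1 > m then c + 1 else m) (by omega) (by split <;> omega)]
          have hge := pvRun_ge t (c + 1)
          simp only [max_def]
          split_ifs <;> omega
      | false =>
          simp only [pvListLoop, pvRun]
          rw [ih 0 m (by omega) (by omega)]
          have := pvRun_nonneg t 0 le_rfl
          omega

-- the enumerate/filter/map pipeline of the port computes pvFalseIdx of the flag list
theorem pvEnum_filter_eq_falseIdx (k : Int) (digits : List Int) :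
    ∀ i : Int,
      (((PySem.List.enumerate digits i).filter
          (fun p => PySem.Int.mod p.2 k ≠ 0)).map (fun p => p.1))
        = pvFalseIdx i (digits.map (fun d => PySem.Int.mod d k == 0)) := by
  induction digits with
  | nil => intro i; simp [PySem.List.enumerate_nil, pvFalseIdx]
  | cons d t ih =>
      intro i
      rw [PySem.List.enumerate_cons]
      by_cases hd : PySem.Int.mod d k = 0
      · have hb : (PySem.Int.mod d k == 0) = true := by simpa using hd
        simp only [List.map_cons, hb, pvFalseIdx]
        rw [List.filter_cons_of_neg (by simpa using hd)]
        exact ih (i + 1)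
      · have hb : (PySem.Int.mod d k == 0) = false := by simpa using hd
        simp only [List.map_cons, hb, pvFalseIdx]
        rw [List.filter_cons_of_pos (by simpa using hd), List.map_cons]
        exact congrArg _ (ih (i + 1))

-- zipping the sentinel-framed bad list with its tail yields exactly pvGaps
theorem pvZip_eq_gaps (fl : List Bool) :
    ∀ prev i : Int,
      (((prev :: (pvFalseIdx i fl ++ [i + fl.length])).zip
          (pvFalseIdx i fl ++ [i + fl.length])).map (fun p => p.2 - p.1 - 1))
        = pvGaps prev i fl := by
  induction fl with
  | nil => intro prev i; simp [pvFalseIdx, pvGaps]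
  | cons b t ih =>
      intro prev i
      cases b with
      | true =>
          simp only [pvFalseIdx, pvGaps, List.length_cons]
          have hc : i + ((t.length + 1 : Nat) : Int) = (i + 1) + (t.length : Int) := by
            push_cast; ring
          rw [hc]
          exact ih prev (i + 1)
      | false =>
          simp only [pvFalseIdx, pvGaps, List.length_cons, List.cons_append,
            List.zip_cons_cons, List.map_cons]
          have hc : i + ((t.length + 1 : Nat) : Int) = (i + 1) + (t.length : Int) := by
            push_cast; ring
          rw [hc]
          exact congrArg _ (ih i (i + 1))

theorem pvGaps_foldl (fl : List Bool) :
    ∀ prev i acc : Int,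
      (pvGaps prev i fl).foldl max acc = max acc (pvRun (i - prev - 1) fl) := by
  induction fl with
  | nil => intro prev i acc; simp [pvGaps, pvRun]
  | cons b t ih =>
      intro prev i acc
      cases b with
      | true =>
          simp only [pvGaps, pvRun]
          rw [ih prev (i + 1) acc]
          have : i + 1 - prev - 1 = i - prev - 1 + 1 := by ring
          rw [this]
      | false =>
          simp only [pvGaps, pvRun, List.foldl_cons]
          rw [ih i (i + 1) (max acc (i - prev - 1))]
          have : i + 1 - i - 1 = 0 := by ring
          rw [this]
          omega

theorem pvGaps_ne_nil (fl : List Bool) : ∀ prev i : Int, pvGaps prev i fl ≠ [] := by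
  induction fl with
  | nil => intro prev i; simp [pvGaps]
  | cons b t ih =>
      intro prev i
      cases b
      · simp [pvGaps]
      · simp only [pvGaps]
        exact ih prev (i + 1)

theorem pvGaps_head (fl : List Bool) :
    ∀ prev i g : Int, ∀ gs : List Int,
      pvGaps prev i fl = g :: gs → gs.foldl max g = pvRun (i - prev - 1) fl := by
  induction fl with
  | nil =>
      intro prev i g gs h
      simp only [pvGaps] at h
      obtain ⟨rfl, rfl⟩ : g = i - prev - 1 ∧ gs = [] := by
        constructor <;> injection h <;> simp_all
      simp [pvRun]
  | cons b t ih =>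
      intro prev i g gs h
      cases b with
      | true =>
          simp only [pvGaps] at h
          have := ih prev (i + 1) g gs h
          simp only [pvRun]
          rw [this]
          congr 1
          ring
      | false =>
          simp only [pvGaps] at h
          obtain ⟨rfl, rfl⟩ : g = i - prev - 1 ∧ gs = pvGaps i (i + 1) t := by
            constructor <;> injection h <;> simp_all
          rw [pvGaps_foldl]
          simp only [pvRun]
          congr 2
          ring

-- ===== VERDICT (by name: the statement is the Claim_ definition above) =====
theorem max_div_seq_spec : Claim_equal_max_div_seq := by
  intro n k _ _
  unfold Spec_max_div_seq max_div_seq max_div_seq_alt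
  rw [pvLoop_eq_listLoop, pvListLoop_eq_run _ 0 0 le_rfl le_rfl]
  set fl := (pvDigits n).map (fun d => PySem.Int.mod d k == 0) with hfl
  have hlen : (pvDigits n).length = fl.length := by simp [hfl]
  simp only [hlen]
  rw [show ((fl.length : Int)) = 0 + (fl.length : Int) by ring]
  rw [pvEnum_filter_eq_falseIdx k (pvDigits n) 0, ← hfl]
  simp only [List.tail_cons]
  rw [pvZip_eq_gaps fl (-1) 0]
  cases hg : pvGaps (-1) 0 fl with
  | nil => exact absurd hg (pvGaps_ne_nil fl (-1) 0)
  | cons g gs =>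
      have hhead := pvGaps_head fl (-1) 0 g gs hg
      have h0 : (0 : Int) - (-1) - 1 = 0 := by ring
      rw [h0] at hhead
      show max 0 (pvRun 0 fl) = gs.foldl max g
      rw [hhead]
      have := pvRun_nonneg fl 0 le_rfl
      omega
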